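-- pv_equiv track=rewrite | github.com/vladdiethecoder/LaTeXify | LaTeXify-root/latexify/pipeline/specialist_router.py | _extract_prompt_version
-- ===== SOURCE A (Python) =====
-- def _extract_prompt_version(text: str) -> str:
--     for line in text.splitlines():
--         if line.lower().startswith("version:"):
--             return line.split(":", 1)[1].strip() or "unknown"
--     for line in text.splitlines():
--         if line.startswith("#"):
--             return line.strip("# ") or "unknown"
--     return "unknown"
-- ===== SOURCE B (Python) =====
-- def _extract_prompt_version(text: str) -> str:
--     fallback = None
--     for line in text.splitlines():
--         if line.lower().startswith("version:"):
--             return line.split(":", 1)[1].strip() or "unknown"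
--         if fallback is None and line.startswith("#"):
--             fallback = line
--     if fallback is not None:
--         return fallback.strip("# ") or "unknown"
--     return "unknown"
-- ===== Notes on version B (the rewrite author's own statement) =====
-- stated objective: simpler
-- what changed: Replaced A's two sequential scans over the split lines with a single pass that returns immediately on a version line and remembers the first comment line in a local fallback variable, applying the final stripping/default transform after the loop.
import Mathlib
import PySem

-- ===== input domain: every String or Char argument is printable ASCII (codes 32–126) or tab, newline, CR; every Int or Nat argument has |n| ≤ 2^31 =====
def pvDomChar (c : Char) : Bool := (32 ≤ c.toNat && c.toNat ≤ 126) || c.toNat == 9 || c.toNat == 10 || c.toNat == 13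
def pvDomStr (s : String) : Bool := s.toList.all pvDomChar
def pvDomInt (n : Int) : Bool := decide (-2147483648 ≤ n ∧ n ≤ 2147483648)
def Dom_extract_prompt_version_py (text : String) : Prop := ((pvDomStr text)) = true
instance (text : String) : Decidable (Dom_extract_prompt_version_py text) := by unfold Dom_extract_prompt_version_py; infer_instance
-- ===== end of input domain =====

-- One-line summary: B collapses A's two sequential scans into a single pass that keeps the
-- first '#' comment line as a fallback; same return value everywhere (objective: simpler).

-- ===== PORT A =====
-- first loop: return the stripped tail of the first case-insensitive 'version:' line
def pvScanVersion : List String → Option String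
  | [] => none
  | l :: ls =>
    if PySem.Str.startswith (PySem.Str.lower l) "version:" = true then
      -- line.split(":", 1)[1] always exists here since the line starts with "version:"
      let v := PySem.Str.strip (((PySem.Str.splitMax? l ":" 1).getD []).getD 1 "")
      some (if v = "" then "unknown" else v)
    else pvScanVersion ls

-- second loop: first line starting with '#', stripped of '#' and spaces
def pvScanComment : List String → Option String
  | [] => none
  | l :: ls =>
    if PySem.Str.startswith l "#" = true then
      let v := PySem.Str.stripChars l "# "
      some (if v = "" then "unknown" else v)
    else pvScanComment ls

def extract_prompt_version_py (text : String) : String :=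
  match pvScanVersion (PySem.Str.splitlines text) with
  | some v => v
  | none =>
    match pvScanComment (PySem.Str.splitlines text) with
    | some v => v
    | none => "unknown"

-- ===== PORT B =====
-- single pass; `fb` holds the first '#' comment line seen so far (B's local variable)
def pvAltLoop : List String → Option String → String
  | [], fb =>
    match fb with
    | some f =>
      let v := PySem.Str.stripChars f "# "
      if v = "" then "unknown" else v
    | none => "unknown"
  | l :: ls, fb =>
    if PySem.Str.startswith (PySem.Str.lower l) "version:" = true then
      let v := PySem.Str.strip (((PySem.Str.splitMax? l ":" 1).getD []).getD 1 "")
      if v = "" then "unknown" else v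
    else
      pvAltLoop ls (if fb.isNone && PySem.Str.startswith l "#" then some l else fb)

def extract_prompt_version_py_alt (text : String) : String :=
  pvAltLoop (PySem.Str.splitlines text) none

-- ===== PRECONDITION & SPEC =====
def Spec_extract_prompt_version_py (text : String) (out : String) : Prop := out = extract_prompt_version_py_alt text
instance (text : String) (out : String) : Decidable (Spec_extract_prompt_version_py text out) := by unfold Spec_extract_prompt_version_py; infer_instance

-- ===== CLAIM (what is proved, stated in full; the proofs are below) =====
def Claim_equal_extract_prompt_version_py : Prop := ∀ (text : String), Dom_extract_prompt_version_py text → Spec_extract_prompt_version_py text (extract_prompt_version_py text)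

-- ===== LEMMAS AND PROOFS =====

-- ===== VERDICT (by name: the statement is the Claim_ definition above) =====
-- with a captured fallback, the remaining loop only looks for a version line
theorem pvAltLoop_some (ls : List String) (f : String) :
    pvAltLoop ls (some f) =
      match pvScanVersion ls with
      | some v => v
      | none =>
        let v := PySem.Str.stripChars f "# "
        if v = "" then "unknown" else v := by
  induction ls with
  | nil => rfl
  | cons l ls ih =>
    by_cases h : PySem.Chars.startswith (PySem.Chars.lower l.toList) ['v', 'e', 'r', 's', 'i', 'o', 'n', ':'] = true <;>
      simp [pvAltLoop, pvScanVersion, PySem.Str.startswith, PySem.Str.lower, h, ih]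

theorem pvAltLoop_none (ls : List String) :
    pvAltLoop ls none =
      match pvScanVersion ls with
      | some v => v
      | none =>
        match pvScanComment ls with
        | some v => v
        | none => "unknown" := by
  induction ls with
  | nil => rfl
  | cons l ls ih =>
    by_cases h : PySem.Chars.startswith (PySem.Chars.lower l.toList) ['v', 'e', 'r', 's', 'i', 'o', 'n', ':'] = true
    · simp [pvAltLoop, pvScanVersion, PySem.Str.startswith, PySem.Str.lower, h]
    · by_cases hc : PySem.Chars.startswith l.toList ['#'] = true
      · simp [pvAltLoop, pvScanVersion, pvScanComment, PySem.Str.startswith, PySem.Str.lower, h, hc,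
          pvAltLoop_some]
      · simp [pvAltLoop, pvScanVersion, pvScanComment, PySem.Str.startswith, PySem.Str.lower, h, hc, ih]

theorem extract_prompt_version_py_spec : Claim_equal_extract_prompt_version_py := by
  intro text _
  unfold Spec_extract_prompt_version_py extract_prompt_version_py extract_prompt_version_py_alt
  rw [pvAltLoop_none]
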